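-- pv_equiv track=rewrite | github.com/SeyoungJeon/Algorithm_Python | Problem/Programmers/2021_LINE/1.py | solution
-- ===== SOURCE A (Python) =====
-- from collections import defaultdict
--
-- def solution(boxes):
--     answer = 0
--
--     box_dict = defaultdict(int)
--     for box in boxes:
--         box_dict[box[0]] += 1
--         box_dict[box[1]] += 1
--
--     wrapped_box = 0
--     for key in box_dict:
--         if box_dict[key] % 2 != 0:
--             answer += 1
--         else:
--             wrapped_box += 1
--
--     if len(boxes) < answer + wrapped_box:
--         answer = len(boxes) - wrapped_box
--
--     return answer
-- ===== SOURCE B (Python) =====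
-- def solution(boxes):
--     ends = sorted(v for box in boxes for v in (box[0], box[1]))
--     answer = 0
--     wrapped = 0
--     run = 0
--     prev = 0
--     for v in ends:
--         if run and v == prev:
--             run += 1
--         else:
--             if run:
--                 if run % 2:
--                     answer += 1
--                 else:
--                     wrapped += 1
--             prev = v
--             run = 1
--     if run:
--         if run % 2:
--             answer += 1
--         else:
--             wrapped += 1
--     if len(boxes) < answer + wrapped:
--         answer = len(boxes) - wrapped
--     return answer
-- ===== Notes on version B (the rewrite author's own statement) =====
-- stated objective: alternative
-- what changed: Replaces the hash-count dict plus a second classification pass over its keys by sort-then-scan: flatten the endpoints, sort them, and classify maximal runs of equal values by run-length parity in one linear scan.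
import Mathlib
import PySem

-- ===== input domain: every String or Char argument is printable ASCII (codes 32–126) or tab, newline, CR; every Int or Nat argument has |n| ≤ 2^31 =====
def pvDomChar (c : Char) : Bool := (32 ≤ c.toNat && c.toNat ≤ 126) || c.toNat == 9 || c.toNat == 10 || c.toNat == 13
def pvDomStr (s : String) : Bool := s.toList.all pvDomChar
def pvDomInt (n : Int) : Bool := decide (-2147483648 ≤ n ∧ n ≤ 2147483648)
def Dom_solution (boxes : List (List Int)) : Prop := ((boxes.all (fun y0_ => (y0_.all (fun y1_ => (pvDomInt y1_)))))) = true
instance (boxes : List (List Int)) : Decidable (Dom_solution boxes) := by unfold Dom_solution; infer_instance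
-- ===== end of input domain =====

-- B replaces A's hash-count dict + second classification pass by sort-then-scan:
-- sort the flattened endpoints and classify maximal equal runs by length parity
-- in one linear scan (objective: alternative).

-- ===== PORT A =====
def solution (boxes : List (List Int)) : Int :=
  let box_dict : PySem.Dict Int Int :=
    boxes.foldl (fun d box =>
      let d := d.modify (PySem.List.pyGetD box 0 0) 0 (· + 1)
      d.modify (PySem.List.pyGetD box 1 0) 0 (· + 1)) PySem.Dict.empty
  let aw : Int × Int :=
    box_dict.keys.foldl (fun p key =>
      if box_dict.getD key 0 % 2 ≠ 0 then (p.1 + 1, p.2) else (p.1, p.2 + 1)) (0, 0)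
  let answer := aw.1
  let wrapped_box := aw.2
  if (boxes.length : Int) < answer + wrapped_box then (boxes.length : Int) - wrapped_box
  else answer

-- ===== PORT B =====
-- the flattened endpoint stream, two values per box
def pvEnds (boxes : List (List Int)) : List Int :=
  boxes.flatMap (fun box => [PySem.List.pyGetD box 0 0, PySem.List.pyGetD box 1 0])

-- state (run, prev, answer, wrapped) — one iteration of B's for-loop body
def pvStep (st : Int × Int × Int × Int) (v : Int) : Int × Int × Int × Int :=
  if st.1 ≠ 0 ∧ v = st.2.1 then (st.1 + 1, st.2.1, st.2.2.1, st.2.2.2)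
  else if st.1 ≠ 0 then
    if st.1 % 2 ≠ 0 then (1, v, st.2.2.1 + 1, st.2.2.2)
    else (1, v, st.2.2.1, st.2.2.2 + 1)
  else (1, v, st.2.2.1, st.2.2.2)

-- B's trailing 'if run:' flush after the loop
def pvFlush (st : Int × Int × Int × Int) : Int × Int :=
  if st.1 ≠ 0 then
    if st.1 % 2 ≠ 0 then (st.2.2.1 + 1, st.2.2.2) else (st.2.2.1, st.2.2.2 + 1)
  else (st.2.2.1, st.2.2.2)

def solution_alt (boxes : List (List Int)) : Int :=
  let ends := PySem.List.sorted (pvEnds boxes) (fun x => x) false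
  let aw := pvFlush (ends.foldl pvStep (0, 0, 0, 0))
  if (boxes.length : Int) < aw.1 + aw.2 then (boxes.length : Int) - aw.2 else aw.1

-- ===== PRECONDITION & SPEC =====
-- A does box[0] and box[1] on every box: it raises IndexError when some box has
-- fewer than 2 elements; Pre_ excludes exactly those inputs (B raises there too).
def Pre_solution (boxes : List (List Int)) : Prop := ∀ b ∈ boxes, 2 ≤ b.length
instance (boxes : List (List Int)) : Decidable (Pre_solution boxes) := by unfold Pre_solution; infer_instance
def pvWitness_solution : List (List Int) := [[1, 2], [2, 3], [1, 2]]
def Spec_solution (boxes : List (List Int)) (out : Int) : Prop := out = solution_alt boxes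
instance (boxes : List (List Int)) (out : Int) : Decidable (Spec_solution boxes out) := by unfold Spec_solution; infer_instance

-- ===== CLAIM (what is proved, stated in full; the proofs are below) =====
def Claim_equal_solution : Prop := ∀ (boxes : List (List Int)), Dom_solution boxes → Pre_solution boxes → Spec_solution boxes (solution boxes)

-- ===== LEMMAS AND PROOFS =====

-- number of distinct elements of S with odd / even multiplicity
def pvOddC (S : List Int) : Int :=
  (S.dedup.countP (fun y => decide ((S.count y : Int) % 2 ≠ 0)) : Int)
def pvEvenC (S : List Int) : Int :=
  (S.dedup.countP (fun y => !decide ((S.count y : Int) % 2 ≠ 0)) : Int)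

-- A's dict loop = counter of the endpoint stream
lemma dict_eq_counter (boxes : List (List Int)) :
    boxes.foldl (fun d box =>
      let d := d.modify (PySem.List.pyGetD box 0 0) 0 (· + 1)
      d.modify (PySem.List.pyGetD box 1 0) 0 (· + 1)) PySem.Dict.empty
    = PySem.Dict.counter (pvEnds boxes) := by
  rw [PySem.Dict.counter_eq_foldl]
  suffices h : ∀ (boxes : List (List Int)) (d : PySem.Dict Int Int),
      boxes.foldl (fun d box =>
        let d := d.modify (PySem.List.pyGetD box 0 0) 0 (· + 1)
        d.modify (PySem.List.pyGetD box 1 0) 0 (· + 1)) d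
      = (pvEnds boxes).foldl (fun d x => d.modify x 0 (· + 1)) d from h boxes _
  intro bs
  induction bs with
  | nil => intro d; rfl
  | cons b bs ih => intro d; simp [pvEnds, List.foldl_cons] at ih ⊢; exact ih _

-- A's classification loop counts odd/even keys
lemma aw_fold (ks : List Int) (c : Int → Prop) [DecidablePred c] (p : Int × Int) :
    ks.foldl (fun p k => if c k then (p.1 + 1, p.2) else (p.1, p.2 + 1)) p
    = (p.1 + (ks.countP (fun k => decide (c k)) : Int),
       p.2 + (ks.countP (fun k => !decide (c k)) : Int)) := by
  induction ks generalizing p with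
  | nil => simp
  | cons k ks ih =>
    simp only [List.foldl_cons, List.countP_cons, ih]
    by_cases h : c k <;> simp [h] <;> ring

-- countP of nodup lists with the same members agree
lemma countP_eq_of_mem_iff {l1 l2 : List Int} (h1 : l1.Nodup) (h2 : l2.Nodup)
    (hm : ∀ x, x ∈ l1 ↔ x ∈ l2) (p : Int → Bool) : l1.countP p = l2.countP p := by
  rw [List.countP_eq_length_filter, List.countP_eq_length_filter]
  exact List.Perm.length_eq (by
    rw [List.perm_ext_iff_of_nodup (h1.filter p) (h2.filter p)]
    intro x; simp [List.mem_filter, hm x])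

-- multiplicity decomposition of one run
lemma oddC_decomp (k : Nat) (hk : 1 ≤ k) (x : Int) (T : List Int) (hx : x ∉ T) :
    pvOddC (List.replicate k x ++ T)
      = (if (k : Int) % 2 ≠ 0 then 1 else 0) + pvOddC T ∧
    pvEvenC (List.replicate k x ++ T)
      = (if (k : Int) % 2 ≠ 0 then 0 else 1) + pvEvenC T := by
  have hcx : (List.replicate k x ++ T).count x = k := by
    simp [List.count_append, List.count_eq_zero_of_not_mem hx]
  have hct : ∀ y ∈ T.dedup, (List.replicate k x ++ T).count y = T.count y := by
    intro y hy
    have hyT : y ∈ T := List.mem_dedup.mp hy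
    have hyx : y ≠ x := fun h => hx (h ▸ hyT)
    have hne : ¬ x = y := fun h => hyx h.symm
    simp [List.count_append, List.count_replicate, hne]
  have hmem : ∀ z, z ∈ (List.replicate k x ++ T).dedup ↔ z ∈ x :: T.dedup := by
    intro z
    simp [List.mem_dedup, List.mem_append, List.mem_replicate]
    constructor
    · rintro (⟨-, h⟩ | h) <;> simp [h]
    · rintro (h | h)
      · exact Or.inl ⟨by omega, h⟩
      · exact Or.inr h
  have hnd : (x :: T.dedup).Nodup := by
    refine List.Nodup.cons (fun h => hx (List.mem_dedup.mp h)) T.nodup_dedup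
  constructor
  · unfold pvOddC
    rw [countP_eq_of_mem_iff (List.nodup_dedup _) hnd hmem]
    rw [List.countP_cons]
    rw [List.countP_congr (fun y hy => by rw [hct y hy])]
    rw [hcx]
    by_cases h : (k : Int) % 2 ≠ 0 <;> simp [h] <;> omega
  · unfold pvEvenC
    rw [countP_eq_of_mem_iff (List.nodup_dedup _) hnd hmem]
    rw [List.countP_cons]
    rw [List.countP_congr (fun y hy => by rw [hct y hy])]
    rw [hcx]
    by_cases h : (k : Int) % 2 ≠ 0 <;> simp [h] <;> omega

-- fold over a run of equal values only grows the run counter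
lemma fold_run (j : Nat) (r : Int) (hr : 1 ≤ r) (x a w : Int) :
    (List.replicate j x).foldl pvStep (r, x, a, w) = (r + j, x, a, w) := by
  induction j generalizing r with
  | zero => simp
  | succ j ih =>
    simp only [List.replicate_succ, List.foldl_cons]
    rw [show pvStep (r, x, a, w) x = (r + 1, x, a, w) by
      simp [pvStep, show r ≠ 0 by omega]]
    rw [ih (r + 1) (by omega)]
    simp only [Prod.mk.injEq]
    refine ⟨by push_cast; ring, trivial⟩

lemma fold_fresh (k : Nat) (hk : 1 ≤ k) (x p a w : Int) :
    (List.replicate k x).foldl pvStep (0, p, a, w) = ((k : Int), x, a, w) := by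
  obtain ⟨j, rfl⟩ : ∃ j, k = j + 1 := ⟨k - 1, by omega⟩
  simp only [List.replicate_succ, List.foldl_cons]
  rw [show pvStep (0, p, a, w) x = (1, x, a, w) by simp [pvStep]]
  rw [fold_run j 1 (by omega)]
  simp only [Prod.mk.injEq]
  refine ⟨by push_cast; ring, trivial⟩

-- the scan of a sorted list counts runs by parity
lemma scan_sorted : ∀ (n : Nat) (S : List Int), S.length ≤ n → S.Pairwise (· ≤ ·) →
    ∀ p0 a w, pvFlush (S.foldl pvStep (0, p0, a, w)) = (a + pvOddC S, w + pvEvenC S) := by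
  intro n
  induction n with
  | zero =>
    intro S hS _ p0 a w
    have hSnil : S = [] := by cases S with | nil => rfl | cons z zs => simp at hS
    subst hSnil
    simp [pvFlush, pvOddC, pvEvenC]
  | succ n ih =>
    intro S hS hsort p0 a w
    match S, hsort, hS with
    | [], _, _ => simp [pvFlush, pvOddC, pvEvenC]
    | x :: S', hsort, hS =>
      have hle : ∀ t ∈ S', x ≤ t := (List.pairwise_cons.mp hsort).1
      obtain ⟨R, T, hRdef, hTdef⟩ :
          ∃ R T, R = List.takeWhile (fun y => y == x) (x :: S') ∧
                 T = List.dropWhile (fun y => y == x) (x :: S') := ⟨_, _, rfl, rfl⟩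
      have hRT : R ++ T = x :: S' := by
        rw [hRdef, hTdef]; exact List.takeWhile_append_dropWhile
      have hrep : R = List.replicate R.length x := by
        refine List.eq_replicate_of_mem (fun b hb => ?_)
        rw [hRdef] at hb
        simpa using List.mem_takeWhile_imp hb
      have hk1 : 1 ≤ R.length := by
        rw [hRdef, List.takeWhile_cons_of_pos (by simp)]
        simp
      have hTsub : T.Sublist (x :: S') := by
        rw [hTdef]; exact List.dropWhile_sublist _
      have hTsort : T.Pairwise (· ≤ ·) := hsort.sublist hTsub
      have hxT : x ∉ T := by
        intro hxmem
        cases hT : T with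
        | nil => rw [hT] at hxmem; simp at hxmem
        | cons y T2 =>
          have hy : (fun y => y == x) y = false := by
            have := List.head_dropWhile_not (fun y => y == x) (l := x :: S')
              (by rw [← hTdef, hT]; simp)
            simpa [← hTdef, hT] using this
          have hyx : y ≠ x := by simpa using hy
          have hyS' : y ∈ S' := by
            have : y ∈ x :: S' := hTsub.mem (by simp [hT])
            rcases List.mem_cons.mp this with h | h
            · exact absurd h hyx
            · exact h
          have hxy : x < y := lt_of_le_of_ne (hle y hyS') (fun h => hyx h.symm)
          rw [hT] at hxmem
          rcases List.mem_cons.mp hxmem with h | h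
          · exact absurd h (ne_of_lt hxy)
          · have : y ≤ x := (List.pairwise_cons.mp (hT ▸ hTsort)).1 x h
            omega
      have hTlen : T.length ≤ n := by
        have : R.length + T.length = S'.length + 1 := by
          have := congrArg List.length hRT; simpa using this
        simp only [List.length_cons] at hS
        omega
      have hdecomp := oddC_decomp R.length hk1 x T hxT
      have hfold : pvFlush ((x :: S').foldl pvStep (0, p0, a, w))
          = pvFlush (T.foldl pvStep ((R.length : Int), x, a, w)) := by
        rw [← hRT, List.foldl_append]
        congr 2
        conv_lhs => rw [hrep]
        simpa using fold_fresh R.length hk1 x p0 a w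
      have hOdd : pvOddC (x :: S')
          = (if (R.length : Int) % 2 ≠ 0 then 1 else 0) + pvOddC T := by
        conv_lhs => rw [← hRT, hrep]
        exact hdecomp.1
      have hEven : pvEvenC (x :: S')
          = (if (R.length : Int) % 2 ≠ 0 then 0 else 1) + pvEvenC T := by
        conv_lhs => rw [← hRT, hrep]
        exact hdecomp.2
      rw [hfold, hOdd, hEven]
      cases hT : T with
      | nil =>
        subst hT
        simp only [List.foldl_nil]
        have hk0 : ((R.length : Int)) ≠ 0 := by omega
        unfold pvFlush
        rw [if_pos hk0]
        by_cases hpar : (R.length : Int) % 2 ≠ 0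
        · rw [if_pos hpar, if_pos hpar, if_pos hpar]
          exact Prod.ext_iff.mpr ⟨by simp [pvOddC], by simp [pvEvenC]⟩
        · rw [if_neg hpar, if_neg hpar, if_neg hpar]
          exact Prod.ext_iff.mpr ⟨by simp [pvOddC], by simp [pvEvenC]⟩
      | cons y T2 =>
        have hyx : y ≠ x := fun h => hxT (hT ▸ (h ▸ List.mem_cons_self))
        have hstep : pvStep ((R.length : Int), x, a, w) y
            = (1, y,
               (if (R.length : Int) % 2 ≠ 0 then a + 1 else a),
               (if (R.length : Int) % 2 ≠ 0 then w else w + 1)) := by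
          unfold pvStep
          rw [if_neg (by simp [hyx])]
          rw [if_pos (show ((R.length : Int)) ≠ 0 by omega)]
          by_cases hpar : (R.length : Int) % 2 ≠ 0
          · rw [if_pos hpar, if_pos hpar, if_pos hpar]
          · rw [if_neg hpar, if_neg hpar, if_neg hpar]
        have hih := ih T hTlen hTsort p0
          (if (R.length : Int) % 2 ≠ 0 then a + 1 else a)
          (if (R.length : Int) % 2 ≠ 0 then w else w + 1)
        have hstart : T.foldl pvStep
            (0, p0,
             (if (R.length : Int) % 2 ≠ 0 then a + 1 else a),
             (if (R.length : Int) % 2 ≠ 0 then w else w + 1))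
            = T2.foldl pvStep (1, y,
               (if (R.length : Int) % 2 ≠ 0 then a + 1 else a),
               (if (R.length : Int) % 2 ≠ 0 then w else w + 1)) := by
          rw [hT, List.foldl_cons]
          congr 1
        rw [hstart] at hih
        rw [hT] at hih
        rw [List.foldl_cons, hstep, hih]
        by_cases hpar : (R.length : Int) % 2 ≠ 0
        · rw [if_pos hpar, if_pos hpar, if_pos hpar, if_pos hpar]
          exact Prod.ext_iff.mpr ⟨by ring, by ring⟩
        · rw [if_neg hpar, if_neg hpar, if_neg hpar, if_neg hpar]
          exact Prod.ext_iff.mpr ⟨by ring, by ring⟩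

-- pvOddC/pvEvenC of the sorted stream = A's key classification counts
lemma oddC_sorted (L : List Int) :
    pvOddC (PySem.List.sorted L (fun x => x) false)
      = ((PySem.Set.ofList L).countP (fun k => decide ((L.count k : Int) % 2 ≠ 0)) : Int) ∧
    pvEvenC (PySem.List.sorted L (fun x => x) false)
      = ((PySem.Set.ofList L).countP (fun k => !decide ((L.count k : Int) % 2 ≠ 0)) : Int) := by
  set S := PySem.List.sorted L (fun x => x) false with hSdef
  have hperm : S.Perm L := PySem.List.sorted_perm L _ _
  have hcnt : ∀ y, S.count y = L.count y := fun y => hperm.count_eq y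
  have hmem : ∀ z, z ∈ S.dedup ↔ z ∈ PySem.Set.ofList L := by
    intro z
    rw [List.mem_dedup, PySem.Set.mem_ofList, hperm.mem_iff]
  constructor
  · unfold pvOddC
    rw [List.countP_congr (fun y _ => by rw [hcnt y])]
    rw [countP_eq_of_mem_iff (List.nodup_dedup S) (PySem.Set.nodup_ofList L) hmem]
  · unfold pvEvenC
    rw [List.countP_congr (fun y _ => by rw [hcnt y])]
    rw [countP_eq_of_mem_iff (List.nodup_dedup S) (PySem.Set.nodup_ofList L) hmem]

-- ===== VERDICT (by name: the statement is the Claim_ definition above) =====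
theorem solution_spec : Claim_equal_solution := by
  intro boxes _ _
  unfold Spec_solution
  simp only [solution, solution_alt, dict_eq_counter, PySem.Dict.keys_counter]
  set L := pvEnds boxes with hL
  rw [aw_fold (PySem.Set.ofList L) (fun k => (PySem.Dict.counter L).getD k 0 % 2 ≠ 0) (0, 0)]
  have hcond : (fun k => decide ((PySem.Dict.counter L).getD k 0 % 2 ≠ 0))
      = (fun k => decide ((L.count k : Int) % 2 ≠ 0)) := by
    funext k; rw [PySem.Dict.getD_counter L k]
  have hcond2 : (fun k => !decide ((PySem.Dict.counter L).getD k 0 % 2 ≠ 0))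
      = (fun k => !decide ((L.count k : Int) % 2 ≠ 0)) := by
    funext k; rw [PySem.Dict.getD_counter L k]
  simp only [hcond, hcond2]
  have hsort : (PySem.List.sorted L (fun x => x) false).Pairwise (· ≤ ·) := by
    have := PySem.List.sorted_pairwise (xs := L) (key := fun x => x)
    simpa using this
  have hscan := scan_sorted (PySem.List.sorted L (fun x => x) false).length
    (PySem.List.sorted L (fun x => x) false) (le_refl _) hsort 0 0 0
  rw [hscan, (oddC_sorted L).1, (oddC_sorted L).2]
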